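-- pv_equiv track=rewrite | github.com/BowmanStephen/Script_Ohio_2.0 | starter_pack/utils/weekly_data_explorer.py | _categorize_features
-- ===== SOURCE A (Python) =====
-- from typing import Dict, List, Any, Optional
--
-- def _categorize_features(columns: List[str]) -> Dict[str, List[str]]:
--     """Categorize features into logical groups"""
--     categories = {
--         "basic_game_info": [],
--         "strength_metrics": [],
--         "adjusted_epa": [],
--         "adjusted_success": [],
--         "adjusted_explosiveness": [],
--         "adjusted_rushing": [],
--         "adjusted_passing": [],
--         "adjusted_line_yards": [],
--         "adjusted_second_level_yards": [],
--         "adjusted_open_field_yards": [],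
--         "havoc_metrics": [],
--         "points_and_margin": [],
--         "field_position": []
--     }
--
--     for col in columns:
--         col_lower = col.lower()
--
--         # Basic game info
--         if col in ["id", "start_date", "season", "season_type", "week", "neutral_site",
--                   "home_team", "home_conference", "away_team", "away_conference"]:
--             categories["basic_game_info"].append(col)
--
--         # Strength metrics
--         elif "elo" in col_lower or "talent" in col_lower:
--             categories["strength_metrics"].append(col)
--
--         # Adjusted EPA
--         elif "adjusted_epa" in col_lower:
--             categories["adjusted_epa"].append(col)
--
--         # Adjusted success rates
--         elif "adjusted_success" in col_lower:
--             categories["adjusted_success"].append(col)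
--
--         # Adjusted explosiveness
--         elif "adjusted" in col_lower and "explosiveness" in col_lower:
--             categories["adjusted_explosiveness"].append(col)
--
--         # Adjusted rushing
--         elif "adjusted" in col_lower and "rushing" in col_lower:
--             categories["adjusted_rushing"].append(col)
--
--         # Adjusted passing
--         elif "adjusted" in col_lower and "passing" in col_lower:
--             categories["adjusted_passing"].append(col)
--
--         # Line yards
--         elif "line_yards" in col_lower:
--             categories["adjusted_line_yards"].append(col)
--
--         # Second level yards
--         elif "second_level" in col_lower:
--             categories["adjusted_second_level_yards"].append(col)
--
--         # Open field yards
--         elif "open_field" in col_lower: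
--             categories["adjusted_open_field_yards"].append(col)
--
--         # Havoc metrics
--         elif "havoc" in col_lower:
--             categories["havoc_metrics"].append(col)
--
--         # Points and margin
--         elif col in ["home_points", "away_points", "margin", "spread"]:
--             categories["points_and_margin"].append(col)
--
--         # Field position
--         elif "avg_start" in col_lower or "points_per_opportunity" in col_lower:
--             categories["field_position"].append(col)
--
--     # Remove empty categories
--     return {k: v for k, v in categories.items() if v}
-- ===== SOURCE B (Python) =====
-- from typing import Dict, List
--
-- _BASIC = frozenset(["id", "start_date", "season", "season_type", "week", "neutral_site",
--                     "home_team", "home_conference", "away_team", "away_conference"])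
-- _POINTS = frozenset(["home_points", "away_points", "margin", "spread"])
--
-- # Ordered rule table: (category name, predicate over (original col, lowercased col)).
-- _RULES = [
--     ("basic_game_info", lambda c, low: c in _BASIC),
--     ("strength_metrics", lambda c, low: "elo" in low or "talent" in low),
--     ("adjusted_epa", lambda c, low: "adjusted_epa" in low),
--     ("adjusted_success", lambda c, low: "adjusted_success" in low),
--     ("adjusted_explosiveness", lambda c, low: "adjusted" in low and "explosiveness" in low),
--     ("adjusted_rushing", lambda c, low: "adjusted" in low and "rushing" in low),
--     ("adjusted_passing", lambda c, low: "adjusted" in low and "passing" in low),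
--     ("adjusted_line_yards", lambda c, low: "line_yards" in low),
--     ("adjusted_second_level_yards", lambda c, low: "second_level" in low),
--     ("adjusted_open_field_yards", lambda c, low: "open_field" in low),
--     ("havoc_metrics", lambda c, low: "havoc" in low),
--     ("points_and_margin", lambda c, low: c in _POINTS),
--     ("field_position", lambda c, low: "avg_start" in low or "points_per_opportunity" in low),
-- ]
--
-- def _classify(col: str):
--     low = col.lower()
--     for name, pred in _RULES:
--         if pred(col, low):
--             return name
--     return None
--
-- def _categorize_features(columns: List[str]) -> Dict[str, List[str]]:
--     """Categorize features into logical groups"""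
--     tagged = [(c, _classify(c)) for c in columns]
--     result = {}
--     for name, _ in _RULES:
--         group = [c for c, tag in tagged if tag == name]
--         if group:
--             result[name] = group
--     return result
-- ===== Notes on version B (the rewrite author's own statement) =====
-- stated objective: alternative
-- what changed: Replaces the per-column if/elif ladder appending into a dict of accumulators by a classify-then-group pass: an ordered rule table tags each column with its first-matching category, then the result is built one category at a time by filtering the tagged columns.
import Mathlib
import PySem

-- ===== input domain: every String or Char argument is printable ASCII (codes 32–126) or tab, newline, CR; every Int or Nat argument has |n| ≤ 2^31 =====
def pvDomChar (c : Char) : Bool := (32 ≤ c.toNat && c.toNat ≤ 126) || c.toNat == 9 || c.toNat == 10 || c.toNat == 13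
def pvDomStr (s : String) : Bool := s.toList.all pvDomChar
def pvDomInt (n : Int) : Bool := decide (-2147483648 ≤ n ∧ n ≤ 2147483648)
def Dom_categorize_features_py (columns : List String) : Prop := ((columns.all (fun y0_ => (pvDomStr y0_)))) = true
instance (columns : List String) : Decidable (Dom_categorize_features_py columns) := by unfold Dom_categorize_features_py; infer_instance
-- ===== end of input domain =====

set_option maxHeartbeats 2000000


-- B replaces A's 13-branch if/elif ladder by a classify-then-group pass: an ordered rule
-- table assigns each column its (first-matching) category, then the output is built one
-- category at a time by filtering the tagged columns.  Objective: alternative decomposition.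

-- ===== PORT A =====
-- literal transliteration of A: a 13-field accumulator record stands for the fixed-key
-- Python dict of lists; the loop body is the same if/elif ladder; the final dict
-- comprehension keeps the non-empty entries in the dict's (fixed) key order.
structure CatsA where
  (basic strength epa succ expl rush pass line second openf havoc points fieldp : List String)
deriving Repr, DecidableEq

def aBasic : List String :=
  ["id", "start_date", "season", "season_type", "week", "neutral_site",
   "home_team", "home_conference", "away_team", "away_conference"]

def aPoints : List String := ["home_points", "away_points", "margin", "spread"]

def aStep (s : CatsA) (col : String) : CatsA :=
  let low := PySem.Str.lower col
  if aBasic.contains col then { s with basic := s.basic ++ [col] }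
  else if PySem.Str.isIn "elo" low || PySem.Str.isIn "talent" low then { s with strength := s.strength ++ [col] }
  else if PySem.Str.isIn "adjusted_epa" low then { s with epa := s.epa ++ [col] }
  else if PySem.Str.isIn "adjusted_success" low then { s with succ := s.succ ++ [col] }
  else if PySem.Str.isIn "adjusted" low && PySem.Str.isIn "explosiveness" low then { s with expl := s.expl ++ [col] }
  else if PySem.Str.isIn "adjusted" low && PySem.Str.isIn "rushing" low then { s with rush := s.rush ++ [col] }
  else if PySem.Str.isIn "adjusted" low && PySem.Str.isIn "passing" low then { s with pass := s.pass ++ [col] }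
  else if PySem.Str.isIn "line_yards" low then { s with line := s.line ++ [col] }
  else if PySem.Str.isIn "second_level" low then { s with second := s.second ++ [col] }
  else if PySem.Str.isIn "open_field" low then { s with openf := s.openf ++ [col] }
  else if PySem.Str.isIn "havoc" low then { s with havoc := s.havoc ++ [col] }
  else if aPoints.contains col then { s with points := s.points ++ [col] }
  else if PySem.Str.isIn "avg_start" low || PySem.Str.isIn "points_per_opportunity" low then { s with fieldp := s.fieldp ++ [col] }
  else s

def categorize_features_py (columns : List String) : List (String × List String) :=
  let s := columns.foldl aStep ⟨[], [], [], [], [], [], [], [], [], [], [], [], []⟩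
  ([("basic_game_info", s.basic), ("strength_metrics", s.strength), ("adjusted_epa", s.epa),
    ("adjusted_success", s.succ), ("adjusted_explosiveness", s.expl), ("adjusted_rushing", s.rush),
    ("adjusted_passing", s.pass), ("adjusted_line_yards", s.line),
    ("adjusted_second_level_yards", s.second), ("adjusted_open_field_yards", s.openf),
    ("havoc_metrics", s.havoc), ("points_and_margin", s.points),
    ("field_position", s.fieldp)]).filter (fun kv => !kv.2.isEmpty)

-- ===== PORT B =====
-- literal transliteration of Source B: the ordered rule table, _classify, tag every column,
-- then group per category in rule order, keeping non-empty groups.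
def bRules : List (String × (String → String → Bool)) :=
  [("basic_game_info", fun c _ => aBasic.contains c),
   ("strength_metrics", fun _ low => PySem.Str.isIn "elo" low || PySem.Str.isIn "talent" low),
   ("adjusted_epa", fun _ low => PySem.Str.isIn "adjusted_epa" low),
   ("adjusted_success", fun _ low => PySem.Str.isIn "adjusted_success" low),
   ("adjusted_explosiveness", fun _ low => PySem.Str.isIn "adjusted" low && PySem.Str.isIn "explosiveness" low),
   ("adjusted_rushing", fun _ low => PySem.Str.isIn "adjusted" low && PySem.Str.isIn "rushing" low),
   ("adjusted_passing", fun _ low => PySem.Str.isIn "adjusted" low && PySem.Str.isIn "passing" low),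
   ("adjusted_line_yards", fun _ low => PySem.Str.isIn "line_yards" low),
   ("adjusted_second_level_yards", fun _ low => PySem.Str.isIn "second_level" low),
   ("adjusted_open_field_yards", fun _ low => PySem.Str.isIn "open_field" low),
   ("havoc_metrics", fun _ low => PySem.Str.isIn "havoc" low),
   ("points_and_margin", fun c _ => aPoints.contains c),
   ("field_position", fun _ low => PySem.Str.isIn "avg_start" low || PySem.Str.isIn "points_per_opportunity" low)]

def bClassify (col : String) : Option String :=
  let low := PySem.Str.lower col
  (bRules.find? (fun r => r.2 col low)).map Prod.fst

def categorize_features_py_alt (columns : List String) : List (String × List String) :=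
  let tagged := columns.map (fun c => (c, bClassify c))
  bRules.foldl (fun res r =>
    let group := (tagged.filter (fun p => p.2 == some r.1)).map Prod.fst
    if group.isEmpty then res else res ++ [(r.1, group)]) []

-- ===== PRECONDITION & SPEC =====
def Spec_categorize_features_py (columns : List String) (out : List (String × List String)) : Prop := out = categorize_features_py_alt columns
instance (columns : List String) (out : List (String × List String)) : Decidable (Spec_categorize_features_py columns out) := by unfold Spec_categorize_features_py; infer_instance

-- ===== CLAIM (what is proved, stated in full; the proofs are below) =====
def Claim_equal_categorize_features_py : Prop := ∀ (columns : List String), Dom_categorize_features_py columns → Spec_categorize_features_py columns (categorize_features_py columns)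

-- ===== LEMMAS AND PROOFS =====

def tagFilter (columns : List String) (n : String) : List String :=
  columns.filter (fun c => bClassify c == some n)

theorem foldA_eq (columns : List String) (s : CatsA) :
    columns.foldl aStep s = ⟨
      s.basic ++ tagFilter columns "basic_game_info",
      s.strength ++ tagFilter columns "strength_metrics",
      s.epa ++ tagFilter columns "adjusted_epa",
      s.succ ++ tagFilter columns "adjusted_success",
      s.expl ++ tagFilter columns "adjusted_explosiveness",
      s.rush ++ tagFilter columns "adjusted_rushing",
      s.pass ++ tagFilter columns "adjusted_passing",
      s.line ++ tagFilter columns "adjusted_line_yards",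
      s.second ++ tagFilter columns "adjusted_second_level_yards",
      s.openf ++ tagFilter columns "adjusted_open_field_yards",
      s.havoc ++ tagFilter columns "havoc_metrics",
      s.points ++ tagFilter columns "points_and_margin",
      s.fieldp ++ tagFilter columns "field_position"⟩ := by
  induction columns generalizing s with
  | nil => simp [tagFilter]
  | cons c cs ih =>
    simp only [List.foldl_cons, ih]
    by_cases h1 : aBasic.contains c = true
    · have hc : bClassify c = some "basic_game_info" := by
        simp only [bClassify, bRules, List.find?, Option.map_some, Option.map_none, h1]
      simp_all [aStep, tagFilter, List.filter_cons, beq_iff_eq, h1, hc] <;> (try (split_ifs <;> simp_all))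
    by_cases h2 : (PySem.Str.isIn "elo" (PySem.Str.lower c) || PySem.Str.isIn "talent" (PySem.Str.lower c)) = true
    · have hc : bClassify c = some "strength_metrics" := by
        simp only [bClassify, bRules, List.find?, Option.map_some, Option.map_none, h1, h2]
      simp_all [aStep, tagFilter, List.filter_cons, beq_iff_eq, h1, h2, hc] <;> (try (split_ifs <;> simp_all))
    by_cases h3 : PySem.Str.isIn "adjusted_epa" (PySem.Str.lower c) = true
    · have hc : bClassify c = some "adjusted_epa" := by
        simp only [bClassify, bRules, List.find?, Option.map_some, Option.map_none, h1, h2, h3]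
      simp_all [aStep, tagFilter, List.filter_cons, beq_iff_eq, h1, h2, h3, hc] <;> (try (split_ifs <;> simp_all))
    by_cases h4 : PySem.Str.isIn "adjusted_success" (PySem.Str.lower c) = true
    · have hc : bClassify c = some "adjusted_success" := by
        simp only [bClassify, bRules, List.find?, Option.map_some, Option.map_none, h1, h2, h3, h4]
      simp_all [aStep, tagFilter, List.filter_cons, beq_iff_eq, h1, h2, h3, h4, hc] <;> (try (split_ifs <;> simp_all))
    by_cases h5 : (PySem.Str.isIn "adjusted" (PySem.Str.lower c) && PySem.Str.isIn "explosiveness" (PySem.Str.lower c)) = true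
    · have hc : bClassify c = some "adjusted_explosiveness" := by
        simp only [bClassify, bRules, List.find?, Option.map_some, Option.map_none, h1, h2, h3, h4, h5]
      simp_all [aStep, tagFilter, List.filter_cons, beq_iff_eq, h1, h2, h3, h4, h5, hc] <;> (try (split_ifs <;> simp_all))
    by_cases h6 : (PySem.Str.isIn "adjusted" (PySem.Str.lower c) && PySem.Str.isIn "rushing" (PySem.Str.lower c)) = true
    · have hc : bClassify c = some "adjusted_rushing" := by
        simp only [bClassify, bRules, List.find?, Option.map_some, Option.map_none, h1, h2, h3, h4, h5, h6]
      simp_all [aStep, tagFilter, List.filter_cons, beq_iff_eq, h1, h2, h3, h4, h5, h6, hc] <;> (try (split_ifs <;> simp_all))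
    by_cases h7 : (PySem.Str.isIn "adjusted" (PySem.Str.lower c) && PySem.Str.isIn "passing" (PySem.Str.lower c)) = true
    · have hc : bClassify c = some "adjusted_passing" := by
        simp only [bClassify, bRules, List.find?, Option.map_some, Option.map_none, h1, h2, h3, h4, h5, h6, h7]
      simp_all [aStep, tagFilter, List.filter_cons, beq_iff_eq, h1, h2, h3, h4, h5, h6, h7, hc] <;> (try (split_ifs <;> simp_all))
    by_cases h8 : PySem.Str.isIn "line_yards" (PySem.Str.lower c) = true
    · have hc : bClassify c = some "adjusted_line_yards" := by
        simp only [bClassify, bRules, List.find?, Option.map_some, Option.map_none, h1, h2, h3, h4, h5, h6, h7, h8]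
      simp_all [aStep, tagFilter, List.filter_cons, beq_iff_eq, h1, h2, h3, h4, h5, h6, h7, h8, hc] <;> (try (split_ifs <;> simp_all))
    by_cases h9 : PySem.Str.isIn "second_level" (PySem.Str.lower c) = true
    · have hc : bClassify c = some "adjusted_second_level_yards" := by
        simp only [bClassify, bRules, List.find?, Option.map_some, Option.map_none, h1, h2, h3, h4, h5, h6, h7, h8, h9]
      simp_all [aStep, tagFilter, List.filter_cons, beq_iff_eq, h1, h2, h3, h4, h5, h6, h7, h8, h9, hc] <;> (try (split_ifs <;> simp_all))
    by_cases h10 : PySem.Str.isIn "open_field" (PySem.Str.lower c) = true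
    · have hc : bClassify c = some "adjusted_open_field_yards" := by
        simp only [bClassify, bRules, List.find?, Option.map_some, Option.map_none, h1, h2, h3, h4, h5, h6, h7, h8, h9, h10]
      simp_all [aStep, tagFilter, List.filter_cons, beq_iff_eq, h1, h2, h3, h4, h5, h6, h7, h8, h9, h10, hc] <;> (try (split_ifs <;> simp_all))
    by_cases h11 : PySem.Str.isIn "havoc" (PySem.Str.lower c) = true
    · have hc : bClassify c = some "havoc_metrics" := by
        simp only [bClassify, bRules, List.find?, Option.map_some, Option.map_none, h1, h2, h3, h4, h5, h6, h7, h8, h9, h10, h11]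
      simp_all [aStep, tagFilter, List.filter_cons, beq_iff_eq, h1, h2, h3, h4, h5, h6, h7, h8, h9, h10, h11, hc] <;> (try (split_ifs <;> simp_all))
    by_cases h12 : aPoints.contains c = true
    · have hc : bClassify c = some "points_and_margin" := by
        simp only [bClassify, bRules, List.find?, Option.map_some, Option.map_none, h1, h2, h3, h4, h5, h6, h7, h8, h9, h10, h11, h12]
      simp_all [aStep, tagFilter, List.filter_cons, beq_iff_eq, h1, h2, h3, h4, h5, h6, h7, h8, h9, h10, h11, h12, hc] <;> (try (split_ifs <;> simp_all))
    by_cases h13 : (PySem.Str.isIn "avg_start" (PySem.Str.lower c) || PySem.Str.isIn "points_per_opportunity" (PySem.Str.lower c)) = true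
    · have hc : bClassify c = some "field_position" := by
        simp only [bClassify, bRules, List.find?, Option.map_some, Option.map_none, h1, h2, h3, h4, h5, h6, h7, h8, h9, h10, h11, h12, h13]
      simp_all [aStep, tagFilter, List.filter_cons, beq_iff_eq, h1, h2, h3, h4, h5, h6, h7, h8, h9, h10, h11, h12, h13, hc] <;> (try (split_ifs <;> simp_all))
    · have hc : bClassify c = none := by
        simp only [bClassify, bRules, List.find?, Option.map_some, Option.map_none, h1, h2, h3, h4, h5, h6, h7, h8, h9, h10, h11, h12, h13]
      simp_all [aStep, tagFilter, List.filter_cons, beq_iff_eq, h1, h2, h3, h4, h5, h6, h7, h8, h9, h10, h11, h12, h13, hc] <;> (try (split_ifs <;> simp_all))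

theorem tagged_group (columns : List String) (n : String) :
    ((columns.map (fun c => (c, bClassify c))).filter
        (fun p => p.2 == some n)).map Prod.fst = tagFilter columns n := by
  induction columns with
  | nil => rfl
  | cons c cs ih => by_cases h : bClassify c == some n <;> simp [tagFilter, List.filter_cons, h] <;>
      simpa [tagFilter] using ih

theorem gen2 (rs : List (String × (String → String → Bool)))
    (tagged : List (String × Option String)) (acc : List (String × List String)) :
    rs.foldl (fun res r =>
        let group := (tagged.filter (fun p => p.2 == some r.1)).map Prod.fst
        if group.isEmpty then res else res ++ [(r.1, group)]) acc
      = acc ++ (rs.map (fun r =>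
          (r.1, (tagged.filter (fun p => p.2 == some r.1)).map Prod.fst))).filter
            (fun kv => !kv.2.isEmpty) := by
  induction rs generalizing acc with
  | nil => simp
  | cons r rs ih =>
    simp only [List.foldl_cons, List.map_cons, List.filter_cons, ih]
    by_cases h : ((tagged.filter (fun p => p.2 == some r.1)).map Prod.fst).isEmpty <;>
      simp [h]

-- ===== VERDICT (by name: the statement is the Claim_ definition above) =====
theorem categorize_features_py_spec : Claim_equal_categorize_features_py := by
  intro columns _
  show categorize_features_py columns = categorize_features_py_alt columns
  unfold categorize_features_py categorize_features_py_alt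
  rw [foldA_eq]
  rw [gen2]
  simp only [List.nil_append, bRules, List.map_cons, List.map_nil, tagged_group]
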